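-- pv_equiv track=rewrite | github.com/zhengJade/WeiboFilter | DataProvider/data.py | title_filter
-- ===== SOURCE A (Python) =====
-- def title_filter(text: str):
--     str_text = ''
--     text_list = list(text)
--     stack = []
--     dict_text = {'#':'#', '】':'【'}
--     for s in text_list:
--         if len(stack) == 0:
--             str_text += s
--
--         elif s == '#' and dict_text['#'] == stack[len(stack)-1]:
--             stack.pop()
--             str_text = ''
--             continue
--
--         elif s == '】' and dict_text['】'] == stack[len(stack)-1]:
--             stack.pop()
--             str_text = ''
--             continue
--
--         if s == '#' or s == '【':
--             stack.append(s)
--             str_text = ''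
--
--     return str_text
-- ===== SOURCE B (Python) =====
-- def title_filter(text: str):
--     # Consume matched marker pairs from the left: everything up to and including
--     # a closed pair is discarded; a pair left open wipes the rest.
--     # (On the printable-ASCII domain only '#' markers can occur.)
--     before, sep, after = text.partition('#')
--     if not sep:
--         return text
--     mid, sep2, rest = after.partition('#')
--     if not sep2:
--         return ''
--     return title_filter(rest)
-- ===== Notes on version B (the rewrite author's own statement) =====
-- stated objective: faster
-- what changed: B replaces A's character-by-character stack machine with incremental string rebuilding by a short recursion that uses str.partition on the hash marker to consume one matched marker pair at a time (a closed pair discards the prefix, an unmatched one wipes the rest), exact on the printable-ASCII domain where the CJK bracket markers cannot occur.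
import Mathlib
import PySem

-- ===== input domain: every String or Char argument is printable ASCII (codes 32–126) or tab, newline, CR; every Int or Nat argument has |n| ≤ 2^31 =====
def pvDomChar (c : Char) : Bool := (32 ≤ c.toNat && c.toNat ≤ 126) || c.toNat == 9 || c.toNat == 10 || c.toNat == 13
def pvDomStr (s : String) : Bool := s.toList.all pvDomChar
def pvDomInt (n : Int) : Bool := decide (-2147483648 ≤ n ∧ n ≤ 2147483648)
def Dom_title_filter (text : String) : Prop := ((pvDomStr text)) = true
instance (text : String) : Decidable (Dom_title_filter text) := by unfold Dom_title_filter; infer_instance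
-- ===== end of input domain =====

-- B consumes matched '#'-pairs from the left via str.partition instead of A's char-by-char
-- stack machine (objective: simpler; on the ASCII domain only '#' markers occur).


-- ===== PORT A =====
-- A's loop body over state (str_text, stack); dict_text is the literal dict from the source.
def tfDict : PySem.Dict Char Char :=
  (PySem.Dict.empty.insert '#' '#').insert '】' '【'

def tfStep (st : List Char × List Char) (s : Char) : List Char × List Char :=
  let str_text := st.1
  let stack := st.2
  if stack.length == 0 then
    -- str_text += s, then the trailing `if s == '#' or s == '【'` push-check
    let str_text := str_text ++ [s]
    if s == '#' || s == '【' then ([], stack ++ [s]) else (str_text, stack)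
  else if s == '#' && tfDict.get? '#' == PySem.List.pyGet? stack ((stack.length : Int) - 1) then
    ([], stack.dropLast)   -- stack.pop(); str_text = ''; continue
  else if s == '】' && tfDict.get? '】' == PySem.List.pyGet? stack ((stack.length : Int) - 1) then
    ([], stack.dropLast)   -- stack.pop(); str_text = ''; continue
  else if s == '#' || s == '【' then ([], stack ++ [s])
  else (str_text, stack)

def title_filter (text : String) : String :=
  String.mk (text.toList.foldl tfStep ([], [])).1

-- ===== PORT B =====
-- hand port of str.partition('#') for the single-char separator B uses:
-- none = no '#'; some (before, after) = the parts around the FIRST '#'.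
def tfPart : List Char → Option (List Char × List Char)
  | [] => none
  | c :: cs =>
      if c = '#' then some ([], cs)
      else (tfPart cs).map (fun p => (c :: p.1, p.2))

theorem tfPart_length {cs u v : List Char} (h : tfPart cs = some (u, v)) :
    v.length < cs.length := by
  induction cs generalizing u v with
  | nil => simp [tfPart] at h
  | cons c cs ih =>
      by_cases hc : c = '#'
      · simp [tfPart, hc] at h
        simp [h.2]
      · simp [tfPart, hc] at h
        obtain ⟨a, h1, h2⟩ := h
        have := ih h1
        simp; omega

def tfAltGo (cs : List Char) : List Char :=
  match hp : tfPart cs with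
  | none => cs
  | some (_, after) =>
      match hq : tfPart after with
      | none => []
      | some (_, rest) => tfAltGo rest
termination_by cs.length
decreasing_by
  have h1 := tfPart_length hp
  have h2 := tfPart_length hq
  omega

def title_filter_alt (text : String) : String :=
  String.mk (tfAltGo text.toList)

-- ===== PRECONDITION & SPEC =====
def Spec_title_filter (text : String) (out : String) : Prop := out = title_filter_alt text
instance (text : String) (out : String) : Decidable (Spec_title_filter text out) := by unfold Spec_title_filter; infer_instance

-- ===== CLAIM (what is proved, stated in full; the proofs are below) =====
def Claim_equal_title_filter : Prop := ∀ (text : String), Dom_title_filter text → Spec_title_filter text (title_filter text)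

-- ===== LEMMAS AND PROOFS =====

-- Dom chars are ASCII-ish, hence never the CJK brackets.
theorem dom_ne_brackets {c : Char} (h : pvDomChar c = true) : c ≠ '【' ∧ c ≠ '】' := by
  constructor <;> intro he <;> subst he <;> simp [pvDomChar] at h

theorem tfPart_none {cs : List Char} (h : tfPart cs = none) : '#' ∉ cs := by
  induction cs with
  | nil => simp
  | cons c cs ih =>
      by_cases hc : c = '#'
      · simp [tfPart, hc] at h
      · simp [tfPart, hc, Option.map_eq_none_iff] at h
        simp [ih h]
        exact fun he => hc he.symm

theorem tfPart_some {cs u v : List Char} (h : tfPart cs = some (u, v)) :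
    cs = u ++ '#' :: v ∧ '#' ∉ u := by
  induction cs generalizing u v with
  | nil => simp [tfPart] at h
  | cons c cs ih =>
      by_cases hc : c = '#'
      · simp [tfPart, hc] at h
        obtain ⟨hu, hv⟩ := h
        subst hu hv
        simp [hc]
      · simp [tfPart, hc] at h
        obtain ⟨a, h1, h2⟩ := h
        obtain ⟨he, hn⟩ := ih h1
        subst h2
        simp [he, hn]
        exact fun h => hc h.symm

-- A's step on a non-marker character: appends when the stack is empty …
theorem tfStep_empty_other {str : List Char} {c : Char} (hdom : pvDomChar c = true)
    (hc : c ≠ '#') : tfStep (str, []) c = (str ++ [c], []) := by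
  have hb := (dom_ne_brackets hdom).1
  simp [tfStep, hc, hb]

-- … and is inert when the stack holds the unmatched '#'.
theorem tfStep_stack_other {str : List Char} {c : Char} (hdom : pvDomChar c = true)
    (hc : c ≠ '#') : tfStep (str, ['#']) c = (str, ['#']) := by
  have hb := (dom_ne_brackets hdom).1
  have hb2 := (dom_ne_brackets hdom).2
  simp [tfStep, hc, hb, hb2]

theorem tfStep_empty_hash (str : List Char) : tfStep (str, []) '#' = ([], ['#']) := by
  simp [tfStep]

theorem tfStep_stack_hash (str : List Char) : tfStep (str, ['#']) '#' = ([], []) := by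
  simp [tfStep]
  decide

-- A run with no '#' from the empty stack just accumulates the characters.
theorem foldl_empty_no_hash {u : List Char} (hdom : u.all pvDomChar = true)
    (hn : '#' ∉ u) : ∀ str, u.foldl tfStep (str, []) = (str ++ u, []) := by
  induction u with
  | nil => simp
  | cons c cs ih =>
      intro str
      simp only [List.all_cons, Bool.and_eq_true] at hdom
      have hc : c ≠ '#' := fun h => hn (h ▸ List.mem_cons_self)
      rw [List.foldl_cons, tfStep_empty_other hdom.1 hc,
        ih hdom.2 (fun h => hn (List.mem_cons_of_mem _ h))]
      simp

-- A run with no '#' from the one-element stack changes nothing.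
theorem foldl_stack_no_hash {u : List Char} (hdom : u.all pvDomChar = true)
    (hn : '#' ∉ u) : ∀ str, u.foldl tfStep (str, ['#']) = (str, ['#']) := by
  induction u with
  | nil => simp
  | cons c cs ih =>
      intro str
      simp only [List.all_cons, Bool.and_eq_true] at hdom
      have hc : c ≠ '#' := fun h => hn (h ▸ List.mem_cons_self)
      rw [List.foldl_cons, tfStep_stack_other hdom.1 hc,
        ih hdom.2 (fun h => hn (List.mem_cons_of_mem _ h))]

-- unfolding equations for tfAltGo's dependent match
theorem tfAltGo_none {cs : List Char} (h : tfPart cs = none) : tfAltGo cs = cs := by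
  rw [tfAltGo.eq_def]
  split
  · rfl
  · next heq => rw [h] at heq; exact absurd heq (by simp)

theorem tfAltGo_some_none {cs u v : List Char} (h1 : tfPart cs = some (u, v))
    (h2 : tfPart v = none) : tfAltGo cs = [] := by
  rw [tfAltGo.eq_def]
  split
  · next heq => rw [h1] at heq; exact absurd heq (by simp)
  · next p after heq =>
      rw [h1] at heq
      cases heq
      split
      · rfl
      · next heq2 => rw [h2] at heq2; exact absurd heq2 (by simp)

theorem tfAltGo_some_some {cs u v w x : List Char} (h1 : tfPart cs = some (u, v))
    (h2 : tfPart v = some (w, x)) : tfAltGo cs = tfAltGo x := by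
  rw [tfAltGo.eq_def]
  split
  · next heq => rw [h1] at heq; exact absurd heq (by simp)
  · next p after heq =>
      rw [h1] at heq
      cases heq
      split
      · next heq2 => rw [h2] at heq2; exact absurd heq2 (by simp)
      · next q rest heq2 =>
          rw [h2] at heq2
          cases heq2
          rfl

-- Main invariant: A's machine computes exactly B's pair-consuming recursion.
theorem foldl_eq_altGo (cs : List Char) (hdom : cs.all pvDomChar = true) :
    (cs.foldl tfStep ([], [])).1 = tfAltGo cs := by
  induction hcs : cs.length using Nat.strong_induction_on generalizing cs with
  | _ n ih =>
  cases hp : tfPart cs with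
  | none =>
      have hn := tfPart_none hp
      rw [tfAltGo_none hp]
      simp [foldl_empty_no_hash hdom hn]
  | some p =>
      obtain ⟨u, v⟩ := p
      obtain ⟨he, hnu⟩ := tfPart_some hp
      subst he
      simp only [List.all_append, List.all_cons, Bool.and_eq_true] at hdom
      rw [List.foldl_append, foldl_empty_no_hash hdom.1 hnu, List.foldl_cons,
        tfStep_empty_hash]
      cases hq : tfPart v with
      | none =>
          have hnv := tfPart_none hq
          rw [tfAltGo_some_none hp hq]
          simp [foldl_stack_no_hash hdom.2.2 hnv]
      | some q =>
          obtain ⟨w, x⟩ := q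
          obtain ⟨he2, hnw⟩ := tfPart_some hq
          subst he2
          simp only [List.all_append, List.all_cons, Bool.and_eq_true] at hdom
          rw [List.foldl_append, foldl_stack_no_hash hdom.2.2.1 hnw, List.foldl_cons,
            tfStep_stack_hash]
          have hlen : x.length < n := by
            subst hcs; simp; omega
          rw [tfAltGo_some_some hp hq]
          exact ih x.length hlen x hdom.2.2.2.2 rfl

-- ===== VERDICT (by name: the statement is the Claim_ definition above) =====
theorem title_filter_spec : Claim_equal_title_filter := by
  intro text hdom
  unfold Spec_title_filter title_filter title_filter_alt
  rw [foldl_eq_altGo text.toList hdom]
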